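-- pv_equiv track=rewrite | github.com/jclements3/HarpHymnal | renderers/html.py | _slugify
-- ===== SOURCE A (Python) =====
-- def _slugify(text: str) -> str:
--     """Lowercase, collapse non-alnum runs to single ``_``, strip edges.
--
--     Kept in sync with ``tools/build_review_html.py::hymn_slug`` from legacy
--     (same algorithm; not imported).
--     """
--     out, prev_us = [], False
--     for ch in text.lower():
--         if ch.isalnum():
--             out.append(ch)
--             prev_us = False
--         elif not prev_us:
--             out.append("_")
--             prev_us = True
--     slug = "".join(out).strip("_")
--     return slug or "untitled"
-- ===== SOURCE B (Python) =====
-- def _slugify(text: str) -> str: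
--     """Scan maximal alnum/non-alnum runs; keep the alnum runs as words and join with '_'."""
--     s = text.lower()
--     words = []
--     i, n = 0, len(s)
--     while i < n:
--         k = s[i].isalnum()
--         j = i + 1
--         while j < n and s[j].isalnum() == k:
--             j += 1
--         if k:
--             words.append(s[i:j])
--         i = j
--     return '_'.join(words) or 'untitled'
-- ===== Notes on version B (the rewrite author's own statement) =====
-- stated objective: alternative
-- what changed: Replaces A's char-by-char accumulator with a prev-underscore flag plus a final edge strip by a two-pointer scan over maximal alnum/non-alnum runs that collects the alnum words directly and joins them with single underscores, so no flag and no stripping are needed.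
import Mathlib
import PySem

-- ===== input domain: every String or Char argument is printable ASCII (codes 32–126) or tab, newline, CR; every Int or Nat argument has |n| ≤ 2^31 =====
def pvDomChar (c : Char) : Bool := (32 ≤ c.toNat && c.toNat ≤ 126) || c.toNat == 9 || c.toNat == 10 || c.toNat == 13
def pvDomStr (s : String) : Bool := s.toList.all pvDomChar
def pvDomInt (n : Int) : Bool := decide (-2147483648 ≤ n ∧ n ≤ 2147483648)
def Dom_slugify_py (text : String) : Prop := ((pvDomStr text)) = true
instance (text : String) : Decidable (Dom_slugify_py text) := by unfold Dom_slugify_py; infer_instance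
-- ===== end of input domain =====

-- B replaces A's per-character accumulator+flag (with a final edge strip) by a run scanner
-- that collects the maximal alnum runs as words and joins them with underscores: alternative, same cost.

-- ===== PORT A =====
-- one iteration of A's for-loop: state = (out, prev_us)
def slugAstep (st : List Char × Bool) (ch : Char) : List Char × Bool :=
  if PySem.Chars.isalnum ch then (st.1 ++ [ch], false)
  else if !st.2 then (st.1 ++ ['_'], true)
  else st

def slugify_py (text : String) : String :=
  let st := (PySem.Chars.lower text.toList).foldl slugAstep ([], false)
  let slug := PySem.Chars.stripChars st.1 ['_']
  if slug = [] then "untitled" else String.ofList slug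

-- ===== PORT B =====
-- B's outer while loop: split off the maximal run of equal isalnum-key, keep it if alnum
def slugWords : List Char → List (List Char)
  | [] => []
  | c :: t =>
    let k := PySem.Chars.isalnum c
    let rest := t.dropWhile (fun d => PySem.Chars.isalnum d == k)
    if k then (c :: t.takeWhile (fun d => PySem.Chars.isalnum d == k)) :: slugWords rest
    else slugWords rest
termination_by cs => cs.length
decreasing_by all_goals exact Nat.lt_succ_of_le (List.length_dropWhile_le _ _)

def slugify_py_alt (text : String) : String :=
  let w := PySem.Chars.join ['_'] (slugWords (PySem.Chars.lower text.toList))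
  if w = [] then "untitled" else String.ofList w

-- ===== PRECONDITION & SPEC =====
def Spec_slugify_py (text : String) (out : String) : Prop := out = slugify_py_alt text
instance (text : String) (out : String) : Decidable (Spec_slugify_py text out) := by unfold Spec_slugify_py; infer_instance

-- ===== CLAIM (what is proved, stated in full; the proofs are below) =====
def Claim_equal_slugify_py : Prop := ∀ (text : String), Dom_slugify_py text → Spec_slugify_py text (slugify_py text)

-- ===== LEMMAS AND PROOFS =====

-- abbreviations for the maximal-run splitters (proof-side only)
def twT (t : List Char) : List Char := t.takeWhile (fun d => PySem.Chars.isalnum d == true)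
def dwT (t : List Char) : List Char := t.dropWhile (fun d => PySem.Chars.isalnum d == true)
def twF (t : List Char) : List Char := t.takeWhile (fun d => PySem.Chars.isalnum d == false)
def dwF (t : List Char) : List Char := t.dropWhile (fun d => PySem.Chars.isalnum d == false)

-- A's pre-strip output, computed run by run (proof-side mirror of A's loop)
def slugRender : List Char → List Char
  | [] => []
  | c :: t =>
    let k := PySem.Chars.isalnum c
    let rest := t.dropWhile (fun d => PySem.Chars.isalnum d == k)
    if k then (c :: t.takeWhile (fun d => PySem.Chars.isalnum d == k)) ++ slugRender rest
    else '_' :: slugRender rest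
termination_by cs => cs.length
decreasing_by all_goals exact Nat.lt_succ_of_le (List.length_dropWhile_le _ _)

theorem slugRender_nil : slugRender [] = [] := by rw [slugRender]
theorem slugWords_nil : slugWords [] = [] := by rw [slugWords]

theorem slugRender_cons_true (c : Char) (t : List Char) (hc : PySem.Chars.isalnum c = true) :
    slugRender (c :: t) = (c :: twT t) ++ slugRender (dwT t) := by
  rw [slugRender]; simp [hc, twT, dwT]

theorem slugRender_cons_false (c : Char) (t : List Char) (hc : PySem.Chars.isalnum c = false) :
    slugRender (c :: t) = '_' :: slugRender (dwF t) := by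
  rw [slugRender]; simp [hc, dwF]

theorem slugWords_cons_true (c : Char) (t : List Char) (hc : PySem.Chars.isalnum c = true) :
    slugWords (c :: t) = (c :: twT t) :: slugWords (dwT t) := by
  rw [slugWords]; simp [hc, twT, dwT]

theorem slugWords_cons_false (c : Char) (t : List Char) (hc : PySem.Chars.isalnum c = false) :
    slugWords (c :: t) = slugWords (dwF t) := by
  rw [slugWords]; simp [hc, dwF]

theorem mem_twT (t : List Char) : ∀ d ∈ twT t, PySem.Chars.isalnum d = true := by
  intro d hd; simpa using List.mem_takeWhile_imp hd

theorem mem_twF (t : List Char) : ∀ d ∈ twF t, PySem.Chars.isalnum d = false := by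
  intro d hd; simpa using List.mem_takeWhile_imp hd

theorem dropWhile_head_not (p : Char → Bool) (l : List Char) :
    (l.dropWhile p) = [] ∨ ∃ d t, l.dropWhile p = d :: t ∧ p d = false := by
  induction l with
  | nil => left; rfl
  | cons c t ih =>
    by_cases hc : p c = true
    · simpa [List.dropWhile_cons, hc] using ih
    · right; exact ⟨c, t, by simp [List.dropWhile_cons, hc], by simpa using hc⟩

theorem head_dwT (t : List Char) :
    dwT t = [] ∨ ∃ d r, dwT t = d :: r ∧ PySem.Chars.isalnum d = false := by
  rcases dropWhile_head_not (fun d => PySem.Chars.isalnum d == true) t with h | ⟨d, r, heq, hd⟩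
  · left; exact h
  · right; exact ⟨d, r, heq, by simpa using hd⟩

theorem head_dwF (t : List Char) :
    dwF t = [] ∨ ∃ d r, dwF t = d :: r ∧ PySem.Chars.isalnum d = true := by
  rcases dropWhile_head_not (fun d => PySem.Chars.isalnum d == false) t with h | ⟨d, r, heq, hd⟩
  · left; exact h
  · right; exact ⟨d, r, heq, by simpa using hd⟩

theorem split_T (c : Char) (t : List Char) : c :: t = (c :: twT t) ++ dwT t := by
  simp [twT, dwT, List.takeWhile_append_dropWhile]

theorem split_F (c : Char) (t : List Char) : c :: t = (c :: twF t) ++ dwF t := by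
  simp [twF, dwF, List.takeWhile_append_dropWhile]

theorem fold_alnum_run (w : List Char) (hw : w ≠ []) (hall : ∀ d ∈ w, PySem.Chars.isalnum d = true) :
    ∀ acc b, w.foldl slugAstep (acc, b) = (acc ++ w, false) := by
  induction w with
  | nil => cases hw rfl
  | cons c t ih =>
    intro acc b
    have hc : PySem.Chars.isalnum c = true := hall c (by simp)
    simp only [List.foldl_cons, slugAstep, hc, if_pos]
    cases t with
    | nil => simp
    | cons d t' =>
      rw [ih (by simp) (fun d hd => hall d (by simp [hd]))]
      simp

theorem fold_non_run_true (w : List Char) (hall : ∀ d ∈ w, PySem.Chars.isalnum d = false) :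
    ∀ acc, w.foldl slugAstep (acc, true) = (acc, true) := by
  induction w with
  | nil => intro acc; rfl
  | cons c t ih =>
    intro acc
    have hc := hall c (by simp)
    simp only [List.foldl_cons, slugAstep, hc]
    exact ih (fun d hd => hall d (by simp [hd])) acc

theorem fold_non_run_false (w : List Char) (hw : w ≠ []) (hall : ∀ d ∈ w, PySem.Chars.isalnum d = false) :
    ∀ acc, w.foldl slugAstep (acc, false) = (acc ++ ['_'], true) := by
  cases w with
  | nil => cases hw rfl
  | cons c t =>
    intro acc
    have hc := hall c (by simp)
    simp only [List.foldl_cons, slugAstep, hc]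
    simp only [Bool.not_false, if_true, Bool.false_eq_true, if_false]
    exact fold_non_run_true t (fun d hd => hall d (by simp [hd])) _

theorem fold_true_head (cs : List Char)
    (h : cs = [] ∨ ∃ d t, cs = d :: t ∧ PySem.Chars.isalnum d = true) :
    ∀ acc, (cs.foldl slugAstep (acc, true)).1 = (cs.foldl slugAstep (acc, false)).1 := by
  rcases h with h | ⟨d, t, rfl, hd⟩
  · subst h; intro acc; rfl
  · intro acc; simp [List.foldl_cons, slugAstep, hd]

theorem fold_eq_render (n : Nat) : ∀ cs : List Char, cs.length ≤ n →
    ∀ acc, (cs.foldl slugAstep (acc, false)).1 = acc ++ slugRender cs := by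
  induction n with
  | zero =>
    intro cs hcs acc
    have : cs = [] := List.eq_nil_of_length_eq_zero (Nat.le_zero.mp hcs)
    subst this; simp [slugRender_nil]
  | succ n ih =>
    intro cs hcs acc
    cases cs with
    | nil => simp [slugRender_nil]
    | cons c t =>
      cases hc : PySem.Chars.isalnum c with
      | true =>
        have hlen : (dwT t).length ≤ n :=
          Nat.le_of_lt_succ (Nat.lt_of_lt_of_le
            (Nat.lt_succ_of_le (List.length_dropWhile_le _ _)) hcs)
        have hall : ∀ d ∈ c :: twT t, PySem.Chars.isalnum d = true := by
          intro d hd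
          rcases List.mem_cons.mp hd with h | h
          · subst h; exact hc
          · exact mem_twT t d h
        rw [show List.foldl slugAstep (acc, false) (c :: t) =
            List.foldl slugAstep (acc, false) ((c :: twT t) ++ dwT t) from by rw [← split_T]]
        rw [List.foldl_append, fold_alnum_run (c :: twT t) (by simp) hall acc false,
          ih (dwT t) hlen (acc ++ (c :: twT t)), slugRender_cons_true c t hc]
        simp
      | false =>
        have hlen : (dwF t).length ≤ n :=
          Nat.le_of_lt_succ (Nat.lt_of_lt_of_le
            (Nat.lt_succ_of_le (List.length_dropWhile_le _ _)) hcs)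
        have hall : ∀ d ∈ c :: twF t, PySem.Chars.isalnum d = false := by
          intro d hd
          rcases List.mem_cons.mp hd with h | h
          · subst h; exact hc
          · exact mem_twF t d h
        rw [show List.foldl slugAstep (acc, false) (c :: t) =
            List.foldl slugAstep (acc, false) ((c :: twF t) ++ dwF t) from by rw [← split_F]]
        rw [List.foldl_append, fold_non_run_false (c :: twF t) (by simp) hall acc]
        rw [fold_true_head (dwF t) (head_dwF t), ih (dwF t) hlen (acc ++ ['_']),
          slugRender_cons_false c t hc]
        simp

theorem alnum_ne_us (d : Char) (h : PySem.Chars.isalnum d = true) :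
    (fun c => List.contains ['_'] c) d = false := by
  have : d ≠ '_' := by
    intro heq; subst heq; revert h; decide
  simpa using this

theorem stripChars_cons_us (x : List Char) :
    PySem.Chars.stripChars ('_' :: x) ['_'] = PySem.Chars.stripChars x ['_'] := by
  simp [PySem.Chars.stripChars, List.dropWhile_cons]

theorem dropWhile_no_sat (p : Char → Bool) (l : List Char) (h : ∀ d ∈ l, p d = false) :
    l.dropWhile p = l := by
  cases l with
  | nil => rfl
  | cons c t => simp [List.dropWhile_cons, h c (by simp)]

theorem rstrip_append (p : Char → Bool) (a b : List Char)
    (hb : (b.reverse.dropWhile p).reverse ≠ []) :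
    ((a ++ b).reverse.dropWhile p).reverse = a ++ (b.reverse.dropWhile p).reverse := by
  have hb' : b.reverse.dropWhile p ≠ [] := by
    intro h; apply hb; rw [h]; rfl
  rw [List.reverse_append, List.dropWhile_append]
  simp only [List.isEmpty_iff, hb']
  simp

theorem strip_no_us (w : List Char) (h : ∀ d ∈ w, PySem.Chars.isalnum d = true) :
    PySem.Chars.stripChars w ['_'] = w := by
  have h1 : ∀ d ∈ w, (fun c => List.contains ['_'] c) d = false :=
    fun d hd => alnum_ne_us d (h d hd)
  have h2 : ∀ d ∈ w.reverse, (fun c => List.contains ['_'] c) d = false :=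
    fun d hd => h1 d (by simpa using hd)
  show (List.dropWhile (fun c => List.contains ['_'] c)
    (List.dropWhile (fun c => List.contains ['_'] c) w).reverse).reverse = w
  rw [dropWhile_no_sat _ _ h1, dropWhile_no_sat _ _ h2, List.reverse_reverse]

theorem strip_no_us_trailing (w : List Char) (hw : w ≠ [])
    (h : ∀ d ∈ w, PySem.Chars.isalnum d = true) :
    PySem.Chars.stripChars (w ++ ['_']) ['_'] = w := by
  have h1 : ∀ d ∈ w, (fun c => List.contains ['_'] c) d = false :=
    fun d hd => alnum_ne_us d (h d hd)
  have h2 : ∀ d ∈ w.reverse, (fun c => List.contains ['_'] c) d = false :=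
    fun d hd => h1 d (by simpa using hd)
  show (List.dropWhile (fun c => List.contains ['_'] c)
    (List.dropWhile (fun c => List.contains ['_'] c) (w ++ ['_'])).reverse).reverse = w
  rw [List.dropWhile_append, dropWhile_no_sat _ _ h1]
  rw [show w.isEmpty = false from by cases w with | nil => cases hw rfl | cons a w' => rfl]
  simp only [Bool.false_eq_true, if_false, List.reverse_append, List.reverse_cons,
    List.reverse_nil, List.nil_append, List.singleton_append, List.dropWhile_cons]
  rw [if_pos (by decide), dropWhile_no_sat _ _ h2, List.reverse_reverse]

theorem join_word_ne_nil (a : Char) (w : List Char) (ws : List (List Char)) :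
    PySem.Chars.join ['_'] ((a :: w) :: ws) ≠ [] := by
  cases ws with
  | nil => simp [PySem.Chars.join_singleton]
  | cons w2 ws2 => simp [PySem.Chars.join_cons_cons]

-- core lemma, right half: stripping A's rendered output yields B's joined words
theorem strip_render_eq_join (n : Nat) : ∀ cs : List Char, cs.length ≤ n →
    PySem.Chars.stripChars (slugRender cs) ['_'] = PySem.Chars.join ['_'] (slugWords cs) := by
  induction n with
  | zero =>
    intro cs hcs
    have : cs = [] := List.eq_nil_of_length_eq_zero (Nat.le_zero.mp hcs)
    subst this
    simp [slugRender_nil, slugWords_nil, PySem.Chars.stripChars, PySem.Chars.join_nil]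
  | succ n ih =>
    intro cs hcs
    cases cs with
    | nil => simp [slugRender_nil, slugWords_nil, PySem.Chars.stripChars, PySem.Chars.join_nil]
    | cons c t =>
      cases hc : PySem.Chars.isalnum c with
      | false =>
        have hlen : (dwF t).length ≤ n :=
          Nat.le_of_lt_succ (Nat.lt_of_lt_of_le
            (Nat.lt_succ_of_le (List.length_dropWhile_le _ _)) hcs)
        rw [slugRender_cons_false c t hc, slugWords_cons_false c t hc, stripChars_cons_us]
        exact ih (dwF t) hlen
      | true =>
        have hlen : (dwT t).length ≤ n :=
          Nat.le_of_lt_succ (Nat.lt_of_lt_of_le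
            (Nat.lt_succ_of_le (List.length_dropWhile_le _ _)) hcs)
        have hall : ∀ d ∈ c :: twT t, PySem.Chars.isalnum d = true := by
          intro d hd
          rcases List.mem_cons.mp hd with h | h
          · subst h; exact hc
          · exact mem_twT t d h
        rw [slugRender_cons_true c t hc, slugWords_cons_true c t hc]
        rcases head_dwT t with hdw | ⟨c', t', hdw, hc'⟩
        · -- the whole input is a single alnum word
          rw [hdw, slugRender_nil, slugWords_nil, List.append_nil,
            PySem.Chars.join_singleton]
          exact strip_no_us _ hall
        · rw [hdw, slugRender_cons_false c' t' hc', slugWords_cons_false c' t' hc']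
          have hlen2 : (dwF t').length ≤ n :=
            Nat.le_trans (List.length_dropWhile_le _ _)
              (Nat.le_trans (Nat.le_succ _) (by have h := hlen; rw [hdw] at h; simpa using h))
          rcases head_dwF t' with hdw2 | ⟨c2, t2, hdw2, hc2⟩
          · -- trailing non-alnum run: render ends in one '_', words end here
            rw [hdw2, slugRender_nil, slugWords_nil, PySem.Chars.join_singleton]
            exact strip_no_us_trailing _ (by simp) hall
          · -- a further word follows after the separator run
            have hIH := ih (dwF t') hlen2
            rw [hdw2] at hIH
            have hwords : slugWords (c2 :: t2) = (c2 :: twT t2) :: slugWords (dwT t2) :=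
              slugWords_cons_true c2 t2 hc2
            have hjoin_ne : PySem.Chars.join ['_'] (slugWords (c2 :: t2)) ≠ [] := by
              rw [hwords]; exact join_word_ne_nil c2 (twT t2) _
            have hrender2 : slugRender (c2 :: t2) = (c2 :: twT t2) ++ slugRender (dwT t2) :=
              slugRender_cons_true c2 t2 hc2
            -- the render of the next word starts with the alnum char c2: lstrip is a no-op
            have hne2 : c2 ≠ '_' := by intro e; subst e; revert hc2; decide
            have hlstrip2 : (slugRender (c2 :: t2)).dropWhile (fun c => List.contains ['_'] c) =
                slugRender (c2 :: t2) := by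
              rw [hrender2]
              simp [hne2]
            have hrstrip2 : ((slugRender (c2 :: t2)).reverse.dropWhile
                (fun c => List.contains ['_'] c)).reverse =
                PySem.Chars.join ['_'] (slugWords (c2 :: t2)) := by
              have h := hIH
              rw [PySem.Chars.stripChars] at h
              rw [hlstrip2] at h
              exact h
            rw [hdw2] at *
            show PySem.Chars.stripChars ((c :: twT t) ++ '_' :: slugRender (c2 :: t2)) ['_'] =
              PySem.Chars.join ['_'] ((c :: twT t) :: slugWords (c2 :: t2))
            rw [PySem.Chars.stripChars]
            rw [show ((c :: twT t) ++ '_' :: slugRender (c2 :: t2)).dropWhile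
                (fun c => List.contains ['_'] c) = (c :: twT t) ++ '_' :: slugRender (c2 :: t2) from by
              have hne : c ≠ '_' := by intro e; subst e; revert hc; decide
              simp [hne]]
            rw [show (c :: twT t) ++ '_' :: slugRender (c2 :: t2) =
                ((c :: twT t) ++ ['_']) ++ slugRender (c2 :: t2) from by simp]
            rw [rstrip_append _ _ _ (by rw [hrstrip2]; exact hjoin_ne), hrstrip2, hwords,
              PySem.Chars.join_cons_cons]

theorem slug_core (cs : List Char) :
    PySem.Chars.stripChars ((cs.foldl slugAstep ([], false)).1) ['_'] =
    PySem.Chars.join ['_'] (slugWords cs) := by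
  rw [fold_eq_render cs.length cs le_rfl [], List.nil_append]
  exact strip_render_eq_join cs.length cs le_rfl

-- ===== VERDICT (by name: the statement is the Claim_ definition above) =====
theorem slugify_py_spec : Claim_equal_slugify_py := by
  intro text _
  show slugify_py text = slugify_py_alt text
  simp only [slugify_py, slugify_py_alt, slug_core]
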